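-- pv_equiv track=rewrite | github.com/TheDaniel166/IsopGem | src/pillars/tq/services/number_properties.py | get_centered_polygonal_info
-- ===== SOURCE A (Python) =====
-- import math
-- from typing import List, Dict, Tuple
--
-- def get_centered_polygonal_info(n: int) -> List[str]:
--     """Check for centered polygonal numbers (3 to 12 sides)."""
--     if n == 1:
--         return ["Centered (All) (Index: 1)"]
--     if n < 1:
--         return []
--
--     results = []
--     # Formula: C(k,n) = (kn(n-1))/2 + 1
--     # Solving for n: n = (k + sqrt(k^2 - 8k + 8kx)) / 2k
--     # where x is the number being checked
--
--     polygons = {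
--         3: "Centered Triangle", 4: "Centered Square", 5: "Centered Pentagonal",
--         6: "Centered Hexagonal", 7: "Centered Heptagonal", 8: "Centered Octagonal",
--         9: "Centered Nonagonal", 10: "Centered Decagonal",
--         11: "Centered Hendecagonal", 12: "Star Number (Centered Dodecagonal)"
--     }
--
--     for k, name in polygons.items():
--         # Discriminant: k^2 - 8k + 8kn
--         # = k^2 + 8k(n-1)
--         discriminant = k**2 + 8 * k * (n - 1)
--         sqrt_disc = int(math.isqrt(discriminant))
--
--         if sqrt_disc * sqrt_disc == discriminant:
--             numerator = k + sqrt_disc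
--             denominator = 2 * k
--
--             if numerator % denominator == 0:
--                 index = numerator // denominator
--                 results.append(f"{name} (Index: {index})")
--
--     return results
-- ===== SOURCE B (Python) =====
-- from typing import List
--
-- def get_centered_polygonal_info(n: int) -> List[str]:
--     """Check for centered polygonal numbers (3 to 12 sides)."""
--     if n == 1:
--         return ["Centered (All) (Index: 1)"]
--     if n < 1:
--         return []
--
--     polygons = {
--         3: "Centered Triangle", 4: "Centered Square", 5: "Centered Pentagonal",
--         6: "Centered Hexagonal", 7: "Centered Heptagonal", 8: "Centered Octagonal",
--         9: "Centered Nonagonal", 10: "Centered Decagonal",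
--         11: "Centered Hendecagonal", 12: "Star Number (Centered Dodecagonal)"
--     }
--
--     results = []
--     for k, name in polygons.items():
--         # generate centered k-gonal numbers forward until we pass n
--         for m in range(1, n + 1):
--             value = k * m * (m - 1) // 2 + 1
--             if value == n:
--                 results.append(f"{name} (Index: {m})")
--                 break
--             if value > n:
--                 break
--     return results
-- ===== Notes on version B (the rewrite author's own statement) =====
-- stated objective: alternative
-- what changed: Replaced A's closed-form discriminant/isqrt inversion of the centered k-gonal formula by a forward generation loop that enumerates successive centered k-gonal numbers k*m*(m-1)//2 plus one until it hits or passes n.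
import Mathlib
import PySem

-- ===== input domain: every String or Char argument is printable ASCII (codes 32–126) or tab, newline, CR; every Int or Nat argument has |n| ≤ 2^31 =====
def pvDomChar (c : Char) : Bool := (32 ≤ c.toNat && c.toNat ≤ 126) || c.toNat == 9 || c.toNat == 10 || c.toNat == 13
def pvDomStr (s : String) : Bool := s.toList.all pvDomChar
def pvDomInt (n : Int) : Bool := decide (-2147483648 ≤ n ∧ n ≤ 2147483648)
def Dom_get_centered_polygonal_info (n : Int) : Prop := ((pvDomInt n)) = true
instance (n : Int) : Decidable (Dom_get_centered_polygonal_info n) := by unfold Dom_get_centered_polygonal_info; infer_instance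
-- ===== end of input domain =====

-- B replaces A's closed-form discriminant inversion with a forward generation of the
-- centered k-gonal numbers until they pass n (objective: alternative, same results).

-- the polygons dict (insertion order), shared context of both ports
def pvPolys : List (Int × String) :=
  [(3, "Centered Triangle"), (4, "Centered Square"), (5, "Centered Pentagonal"),
   (6, "Centered Hexagonal"), (7, "Centered Heptagonal"), (8, "Centered Octagonal"),
   (9, "Centered Nonagonal"), (10, "Centered Decagonal"),
   (11, "Centered Hendecagonal"), (12, "Star Number (Centered Dodecagonal)")]

-- ===== PORT A =====
-- loop body of A's for-loop over the dict
-- math.isqrt is ported as Nat.sqrt (floor square root); exact here since the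
-- discriminant is ≥ 0 on this branch (n ≥ 2, k ≥ 3)
def pvStepA (n : Int) (results : List String) (kn : Int × String) : List String :=
  let k := kn.1
  let discriminant := k ^ 2 + 8 * k * (n - 1)
  let sqrt_disc : Int := Int.ofNat (Nat.sqrt discriminant.toNat)
  if sqrt_disc * sqrt_disc = discriminant then
    let numerator := k + sqrt_disc
    let denominator := 2 * k
    if PySem.Int.mod numerator denominator = 0 then
      results ++ [kn.2 ++ " (Index: " ++ PySem.Int.toStr (PySem.Int.floordiv numerator denominator) ++ ")"]
    else results
  else results

def get_centered_polygonal_info (n : Int) : List String :=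
  if n = 1 then ["Centered (All) (Index: 1)"]
  else if n < 1 then []
  else pvPolys.foldl (pvStepA n) []

-- ===== PORT B =====
-- B's inner for-loop over m in range(1, n+1) with its two breaks, as recursion on
-- the loop counter m (range(1, n+1) iterated lazily, not materialized)
def pvScan (n k m : Int) (name : String) (results : List String) : List String :=
  if h : m < n + 1 then
    let value := PySem.Int.floordiv (k * m * (m - 1)) 2 + 1
    if value = n then results ++ [name ++ " (Index: " ++ PySem.Int.toStr m ++ ")"]
    else if value > n then results
    else pvScan n k (m + 1) name results
  else results
termination_by (n + 1 - m).toNat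
decreasing_by omega

def get_centered_polygonal_info_alt (n : Int) : List String :=
  if n = 1 then ["Centered (All) (Index: 1)"]
  else if n < 1 then []
  else pvPolys.foldl (fun results kn => pvScan n kn.1 1 kn.2 results) []

-- ===== PRECONDITION & SPEC =====
def Spec_get_centered_polygonal_info (n : Int) (out : List String) : Prop := out = get_centered_polygonal_info_alt n
instance (n : Int) (out : List String) : Decidable (Spec_get_centered_polygonal_info n out) := by unfold Spec_get_centered_polygonal_info; infer_instance

-- ===== CLAIM (what is proved, stated in full; the proofs are below) =====
def Claim_equal_get_centered_polygonal_info : Prop := ∀ (n : Int), Dom_get_centered_polygonal_info n → Spec_get_centered_polygonal_info n (get_centered_polygonal_info n)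

-- ===== LEMMAS AND PROOFS =====

-- k*m*(m-1) is even, so B's floor division by 2 is exact
theorem pv_even_body (k m : Int) : 2 * (k * (m * (m - 1)) / 2) = k * m * (m - 1) := by
  have h : Even (m * (m - 1)) := by
    rcases Int.even_or_odd m with h | h
    · exact h.mul_right _
    · exact Even.mul_left (by rcases h with ⟨t, ht⟩; exact ⟨t, by omega⟩) _
  rcases h with ⟨t, ht⟩
  have h2 : k * (m * (m - 1)) = 2 * (k * t) := by rw [ht]; ring
  rw [h2, Int.mul_ediv_cancel_left _ (by norm_num : (2:Int) ≠ 0), ← h2]; ring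

theorem pv_value_eq (k m : Int) :
    PySem.Int.floordiv (k * m * (m - 1)) 2 + 1 = k * (m * (m - 1)) / 2 + 1 := by
  rw [PySem.Int.floordiv_eq_ediv_of_pos (by norm_num : (0:Int) < 2)]
  congr 1
  rw [mul_assoc]

-- the generated value at m, as an exact equation
theorem pv_value_eq_iff (n k m : Int) :
    (PySem.Int.floordiv (k * m * (m - 1)) 2 + 1 = n) ↔ k * m * (m - 1) = 2 * (n - 1) := by
  rw [pv_value_eq]
  constructor
  · intro h
    have := pv_even_body k m
    omega
  · intro h
    have := pv_even_body k m
    omega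

-- strict growth of the generator
theorem pv_value_lt (k a m : Int) (hk : 3 ≤ k) (ha : 1 ≤ a) (ham : a < m) :
    k * a * (a - 1) < k * m * (m - 1) := by
  have key : a * (a - 1) < m * (m - 1) := by
    nlinarith [mul_pos (show (0:Int) < m - a by omega) (show (0:Int) < m + a - 1 by omega)]
  nlinarith [mul_lt_mul_of_pos_left key (show (0:Int) < k by omega)]

-- B's scan reaches the unique hit m
theorem pv_scan_hit (n k m : Int) (name : String) (results : List String)
    (hk : 3 ≤ k) (hm : 1 ≤ m) (hmn : m ≤ n)
    (hv : k * m * (m - 1) = 2 * (n - 1)) :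
    ∀ a : Int, 1 ≤ a → a ≤ m →
      pvScan n k a name results =
        results ++ [name ++ " (Index: " ++ PySem.Int.toStr m ++ ")"] := by
  intro a ha ham
  generalize hF : (m - a).toNat = F at *
  induction F generalizing a with
  | zero =>
    have hae : a = m := by omega
    subst hae
    rw [pvScan, dif_pos (by omega : a < n + 1)]
    rw [if_pos ((pv_value_eq_iff n k a).mpr hv)]
  | succ F ih =>
    rw [pvScan, dif_pos (by omega : a < n + 1)]
    have hlt : k * a * (a - 1) < k * m * (m - 1) := pv_value_lt k a m hk ha (by omega)
    have hne : ¬ (PySem.Int.floordiv (k * a * (a - 1)) 2 + 1 = n) := by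
      rw [pv_value_eq_iff]; omega
    have hgt : ¬ (PySem.Int.floordiv (k * a * (a - 1)) 2 + 1 > n) := by
      have h1 := pv_value_eq k a
      have h2 := pv_even_body k a
      omega
    simp only [if_neg hne, if_neg hgt]
    exact ih (a + 1) (by omega) (by omega) (by omega)

-- B's scan finds nothing when there is no hit
theorem pv_scan_miss (n k : Int) (name : String) (results : List String)
    (hk : 3 ≤ k)
    (hno : ∀ m : Int, 1 ≤ m → k * m * (m - 1) ≠ 2 * (n - 1)) :
    ∀ a : Int, 1 ≤ a →
      pvScan n k a name results = results := by
  intro a ha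
  by_cases hle : n + 1 ≤ a
  · rw [pvScan, dif_neg (by omega)]
  · generalize hF : (n + 1 - a).toNat = F at *
    induction F generalizing a with
    | zero => omega
    | succ F ih =>
      rw [pvScan, dif_pos (by omega : a < n + 1)]
      have hne : ¬ (PySem.Int.floordiv (k * a * (a - 1)) 2 + 1 = n) := by
        rw [pv_value_eq_iff]; exact hno a ha
      simp only [if_neg hne]
      split
      · rfl
      · by_cases hle2 : n + 1 ≤ a + 1
        · rw [pvScan, dif_neg (by omega)]
        · exact ih (a + 1) (by omega) hle2 (by omega)

-- a hit index is at most n (so it lies inside range(1, n+1))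
theorem pv_hit_le (n k m : Int) (hk : 3 ≤ k) (hm : 1 ≤ m) (hn : 2 ≤ n)
    (hv : k * m * (m - 1) = 2 * (n - 1)) : m ≤ n := by
  have hm2 : 2 ≤ m := by
    by_contra h
    have : m = 1 := by omega
    subst this; simp at hv; omega
  nlinarith [mul_nonneg (show (0:Int) ≤ k - 3 by omega) (mul_nonneg (show (0:Int) ≤ m by omega) (show (0:Int) ≤ m - 1 by omega)),
    mul_nonneg (show (0:Int) ≤ m - 2 by omega) (show (0:Int) ≤ m - 1 by omega)]

-- per-polygon step equivalence: A's discriminant test = B's forward scan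
theorem pv_step_eq (n k : Int) (name : String) (results : List String)
    (hn : 2 ≤ n) (hk : 3 ≤ k) :
    pvStepA n results (k, name) =
      pvScan n k 1 name results := by
  by_cases h : ∃ m : Int, 1 ≤ m ∧ k * m * (m - 1) = 2 * (n - 1)
  · obtain ⟨m, hm, hv⟩ := h
    have hmn := pv_hit_le n k m hk hm hn hv
    have hsq : k ^ 2 + 8 * k * (n - 1) = (2 * k * m - k) * (2 * k * m - k) := by
      nlinarith [hv]
    have htpos : 0 ≤ 2 * k * m - k := by nlinarith
    have hs : Int.ofNat (Nat.sqrt (k ^ 2 + 8 * k * (n - 1)).toNat) = 2 * k * m - k := by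
      have ht : (2 * k * m - k) = ((2 * k * m - k).toNat : Int) := (Int.toNat_of_nonneg htpos).symm
      rw [hsq, ht, show (((2 * k * m - k).toNat : Int) * ((2 * k * m - k).toNat : Int))
            = (((2 * k * m - k).toNat * (2 * k * m - k).toNat : Nat) : Int) by push_cast; ring,
          Int.toNat_natCast, ← pow_two, Nat.sqrt_eq']
      rfl
    unfold pvStepA
    simp only [hs]
    rw [if_pos (by linarith [hsq] : (2 * k * m - k) * (2 * k * m - k) = k ^ 2 + 8 * k * (n - 1))]
    have hks : k + (2 * k * m - k) = 2 * k * m := by ring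
    have hmod : PySem.Int.mod (k + (2 * k * m - k)) (2 * k) = 0 := by
      rw [PySem.Int.mod_eq_zero_iff_dvd, hks]
      exact Dvd.intro m rfl
    rw [if_pos hmod]
    have hdiv : PySem.Int.floordiv (k + (2 * k * m - k)) (2 * k) = m := by
      rw [hks, PySem.Int.floordiv_eq_ediv_of_pos (by omega)]
      exact Int.mul_ediv_cancel_left m (by omega : (2*k:Int) ≠ 0)
    rw [hdiv, pv_scan_hit n k m name results hk hm hmn hv 1 le_rfl hm]
  · push_neg at h
    rw [pv_scan_miss n k name results hk (fun m hm => h m hm) 1 le_rfl]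
    unfold pvStepA
    simp only
    split
    · rename_i hsq
      split
      · rename_i hmod
        exfalso
        rw [PySem.Int.mod_eq_zero_iff_dvd] at hmod
        obtain ⟨m, hmm⟩ := hmod
        have hspos : (0:Int) ≤ Int.ofNat (Nat.sqrt (k ^ 2 + 8 * k * (n - 1)).toNat) := by
          exact Int.ofNat_nonneg _
        set s : Int := Int.ofNat (Nat.sqrt (k ^ 2 + 8 * k * (n - 1)).toNat) with hsdef
        have hm1 : 1 ≤ m := by nlinarith
        have hveq : k * m * (m - 1) = 2 * (n - 1) := by
          have hsm : s = 2 * k * m - k := by omega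
          rw [hsm] at hsq
          nlinarith [hsq]
        exact h m hm1 hveq
      · rfl
    · rfl

-- the two folds agree link by link
theorem pv_fold_eq (n : Int) (hn : 2 ≤ n) :
    ∀ (L : List (Int × String)), (∀ p ∈ L, 3 ≤ p.1) → ∀ init : List String,
      L.foldl (pvStepA n) init =
        L.foldl (fun results kn => pvScan n kn.1 1 kn.2 results) init := by
  intro L
  induction L with
  | nil => intro _ _; rfl
  | cons p L ih =>
    intro hall init
    simp only [List.foldl_cons]
    rw [show pvStepA n init p = pvScan n p.1 1 p.2 init from
      pv_step_eq n p.1 p.2 init hn (hall p (by simp))]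
    exact ih (fun q hq => hall q (by simp [hq])) _

-- ===== VERDICT (by name: the statement is the Claim_ definition above) =====
theorem get_centered_polygonal_info_spec : Claim_equal_get_centered_polygonal_info := by
  intro n _
  unfold Spec_get_centered_polygonal_info get_centered_polygonal_info get_centered_polygonal_info_alt
  by_cases h1 : n = 1
  · simp [h1]
  · by_cases h2 : n < 1
    · simp [h1, h2]
    · simp only [if_neg h1, if_neg h2]
      exact pv_fold_eq n (by omega) pvPolys (by decide) []
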